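-- pv_equiv track=rewrite | github.com/parallelno/Vector06c | Vector06c_Dev/_Projects/GameNoname/temp/tests/smallDict.py | FindLinerSeqs3
-- ===== SOURCE A (Python) =====
-- def FindLinerSeqs3(data):
-- 	linearSeqs = []
-- 	i = 2
-- 	while i< len(data):
-- 		p1 = data[i-2]
-- 		p2 = data[i-1]
-- 		p3 = data[i]
--
-- 		if p2-p1 == p3-p2:
-- 			linearSeqs.append((p1, p2, p3))
-- 		i += 1
-- 	return linearSeqs
-- ===== SOURCE B (Python) =====
-- def FindLinerSeqs3(data):
-- 	# Run-segmentation: split data into maximal arithmetic runs, then emit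
-- 	# every consecutive triple inside each run (a triple is an AP iff both
-- 	# of its gaps lie in the same constant-difference run).
-- 	res = []
-- 	n = len(data)
-- 	s = 0
-- 	while s + 1 < n:
-- 		d = data[s + 1] - data[s]
-- 		e = s + 1
-- 		while e + 1 < n and data[e + 1] - data[e] == d:
-- 			e += 1
-- 		for j in range(s, e - 1):
-- 			res.append((data[j], data[j + 1], data[j + 2]))
-- 		s = e
-- 	return res
-- ===== Notes on version B (the rewrite author's own statement) =====
-- stated objective: alternative
-- what changed: B segments the data into maximal arithmetic runs (a nested while loop finding each run's end) and bulk-emits the triples of every run, instead of A's flat index loop testing the AP condition for each triple independently.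
import Mathlib
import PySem

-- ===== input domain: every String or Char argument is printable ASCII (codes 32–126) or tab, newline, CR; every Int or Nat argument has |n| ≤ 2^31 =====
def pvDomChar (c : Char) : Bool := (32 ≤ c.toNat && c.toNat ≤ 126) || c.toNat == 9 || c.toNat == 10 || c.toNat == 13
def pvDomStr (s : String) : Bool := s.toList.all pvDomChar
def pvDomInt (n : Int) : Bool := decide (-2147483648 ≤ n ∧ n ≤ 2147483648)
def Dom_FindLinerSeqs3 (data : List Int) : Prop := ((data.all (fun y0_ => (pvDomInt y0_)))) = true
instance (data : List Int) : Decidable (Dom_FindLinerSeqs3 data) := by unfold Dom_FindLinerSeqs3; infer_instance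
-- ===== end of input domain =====

-- B segments data into maximal arithmetic runs and emits all triples of each run,
-- instead of A's per-index scan testing each triple (objective: alternative).

-- ===== PORT A =====
def FindLinerSeqs3 (data : List Int) : List (Int × Int × Int) :=
  (PySem.List.pyRange 2 (PySem.List.len data) 1).foldl
    (fun acc i =>
      if PySem.List.pyGetD data (i - 1) 0 - PySem.List.pyGetD data (i - 2) 0 ==
         PySem.List.pyGetD data i 0 - PySem.List.pyGetD data (i - 1) 0
      then acc ++ [(PySem.List.pyGetD data (i - 2) 0,
                    PySem.List.pyGetD data (i - 1) 0,
                    PySem.List.pyGetD data i 0)]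
      else acc) []

-- ===== PORT B =====
-- inner while loop: extend the run end e while the next gap still equals d
def runEnd3 (data : List Int) (d : Int) (e : Nat) : Nat :=
  if h : e + 1 < data.length ∧ (data.getD (e + 1) 0 - data.getD e 0 == d) = true then
    runEnd3 data d (e + 1)
  else e
termination_by data.length - e
decreasing_by omega

theorem runEnd3_ge (data : List Int) (d : Int) (e : Nat) : e ≤ runEnd3 data d e := by
  fun_induction runEnd3 data d e with
  | case1 e h ih => omega
  | case2 e h => omega

-- outer while loop over run starts s; the inner for loop appends the run's triples
def runsLoop (data : List Int) (res : List (Int × Int × Int)) (s : Nat) :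
    List (Int × Int × Int) :=
  if _h : s + 1 < data.length then
    let d := data.getD (s + 1) 0 - data.getD s 0
    let e := runEnd3 data d (s + 1)
    runsLoop data
      ((List.range' s (e - 1 - s)).foldl
        (fun acc j => acc ++ [(data.getD j 0, data.getD (j + 1) 0, data.getD (j + 2) 0)]) res)
      e
  else res
termination_by data.length - s
decreasing_by
  have := runEnd3_ge data (data.getD (s + 1) 0 - data.getD s 0) (s + 1)
  omega

def FindLinerSeqs3_alt (data : List Int) : List (Int × Int × Int) :=
  runsLoop data [] 0

-- ===== PRECONDITION & SPEC =====
def Spec_FindLinerSeqs3 (data : List Int) (out : List (Int × Int × Int)) : Prop := out = FindLinerSeqs3_alt data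
instance (data : List Int) (out : List (Int × Int × Int)) : Decidable (Spec_FindLinerSeqs3 data out) := by unfold Spec_FindLinerSeqs3; infer_instance

-- ===== CLAIM (what is proved, stated in full; the proofs are below) =====
def Claim_equal_FindLinerSeqs3 : Prop := ∀ (data : List Int), Dom_FindLinerSeqs3 data → Spec_FindLinerSeqs3 data (FindLinerSeqs3 data)

-- ===== LEMMAS AND PROOFS =====

-- the AP condition at triple start j, and the triple emitted there
def pvCond (data : List Int) (j : Nat) : Bool :=
  data.getD (j + 1) 0 - data.getD j 0 == data.getD (j + 2) 0 - data.getD (j + 1) 0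

def pvTri (data : List Int) (j : Nat) : Int × Int × Int :=
  (data.getD j 0, data.getD (j + 1) 0, data.getD (j + 2) 0)

-- A equals the global filter of the condition over all triple starts
theorem A_eq_filter (data : List Int) :
    FindLinerSeqs3 data =
      ((List.range' 0 (data.length - 2)).filter (pvCond data)).map (pvTri data) := by
  unfold FindLinerSeqs3
  rw [PySem.List.foldl_append_if]
  simp only [List.nil_append, PySem.List.len_eq]
  rw [PySem.List.pyRange_one]
  rw [List.filter_map, List.map_map]
  have hn : (((data.length : Int)) - 2).toNat = data.length - 2 := by omega
  rw [hn, ← List.range_eq_range']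
  have hA1 : ∀ k : Nat, (2 : Int) + k - 2 = ((k : Nat) : Int) := by intro k; ring_nf
  have hA2 : ∀ k : Nat, (2 : Int) + k - 1 = (((k + 1 : Nat)) : Int) := by intro k; push_cast; ring_nf
  have hA3 : ∀ k : Nat, (2 : Int) + k = (((k + 2 : Nat)) : Int) := by intro k; push_cast; ring_nf
  have hfilter :
      (List.range (data.length - 2)).filter
          ((fun i => PySem.List.pyGetD data (i - 1) 0 - PySem.List.pyGetD data (i - 2) 0 ==
              PySem.List.pyGetD data i 0 - PySem.List.pyGetD data (i - 1) 0) ∘ (fun k : Nat => (2 : Int) + k))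
      = (List.range (data.length - 2)).filter (pvCond data) := by
    apply List.filter_congr
    intro k _
    simp only [Function.comp]
    rw [hA1 k, hA2 k, hA3 k]
    simp only [PySem.List.pyGetD_natCast]
    rfl
  rw [hfilter]
  apply List.map_congr_left
  intro k _
  simp only [Function.comp]
  rw [hA1 k, hA2 k, hA3 k]
  simp only [PySem.List.pyGetD_natCast]
  rfl

-- runEnd3 stays below the length
theorem runEnd3_lt (data : List Int) (d : Int) (e : Nat) (he : e < data.length) :
    runEnd3 data d e < data.length := by
  fun_induction runEnd3 data d e with
  | case1 e h ih => exact ih h.1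
  | case2 e h => exact he

-- all gaps inside [e, runEnd3) equal d
theorem runEnd3_run (data : List Int) (d : Int) (e : Nat) :
    ∀ j, e ≤ j → j < runEnd3 data d e → data.getD (j + 1) 0 - data.getD j 0 = d := by
  fun_induction runEnd3 data d e with
  | case1 e h ih =>
    intro j hj1 hj2
    rcases Nat.eq_or_lt_of_le hj1 with rfl | hlt
    · exact eq_of_beq h.2
    · exact ih j hlt hj2
  | case2 e h => intro j hj1 hj2; omega

-- maximality: the gap at runEnd3 (if it exists) differs from d
theorem runEnd3_max (data : List Int) (d : Int) (e : Nat)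
    (h1 : runEnd3 data d e + 1 < data.length) :
    data.getD (runEnd3 data d e + 1) 0 - data.getD (runEnd3 data d e) 0 ≠ d := by
  fun_induction runEnd3 data d e with
  | case1 e h ih => exact ih h1
  | case2 e h =>
    intro hcontra
    exact h ⟨h1, beq_iff_eq.mpr hcontra⟩

-- splitting a unit-step range at an interior point
theorem range'_split (s a b : Nat) :
    List.range' s (a + b) = List.range' s a ++ List.range' (s + a) b := by
  have h := List.range'_append (s := s) (m := a) (n := b) (step := 1)
  rw [one_mul] at h
  exact h.symm

-- the inner for loop is an append of the mapped range
theorem foldl_tri (data : List Int) (res : List (Int × Int × Int)) (l : List Nat) :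
    l.foldl (fun acc j => acc ++ [(data.getD j 0, data.getD (j + 1) 0, data.getD (j + 2) 0)]) res
      = res ++ l.map (pvTri data) := by
  induction l generalizing res with
  | nil => simp
  | cons x xs ih =>
    rw [List.foldl_cons, ih, List.map_cons, List.append_cons]
    simp [pvTri]

-- main loop invariant: runsLoop from s appends the filtered triples with start ≥ s
theorem runsLoop_eq (data : List Int) (res : List (Int × Int × Int)) (s : Nat) :
    runsLoop data res s =
      res ++ ((List.range' s (data.length - 2 - s)).filter (pvCond data)).map (pvTri data) := by
  fun_induction runsLoop data res s with
  | case1 res s h d e ih =>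
    rw [ih, foldl_tri, List.append_assoc]
    have hge : s + 1 ≤ e := runEnd3_ge data d (s + 1)
    have hlt : e < data.length := runEnd3_lt data d (s + 1) h
    have hrun : ∀ j, s ≤ j → j < e → data.getD (j + 1) 0 - data.getD j 0 = d := by
      intro j h1 h2
      rcases Nat.eq_or_lt_of_le h1 with rfl | hlt'
      · rfl
      · exact runEnd3_run data d (s + 1) j hlt' h2
    have hcondT : ∀ j, s ≤ j → j + 2 ≤ e → pvCond data j = true := by
      intro j h1 h2
      have e1 := hrun j h1 (by omega)
      have e2 : data.getD (j + 2) 0 - data.getD (j + 1) 0 = d := hrun (j + 1) (by omega) (by omega)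
      simp only [pvCond]
      rw [e1, e2]
      exact beq_self_eq_true d
    suffices hsplit : (List.range' s (data.length - 2 - s)).filter (pvCond data)
        = List.range' s (e - 1 - s) ++ (List.range' e (data.length - 2 - e)).filter (pvCond data) by
      rw [hsplit, List.map_append]
    by_cases hE : e + 1 < data.length
    · have hcondF : pvCond data (e - 1) = false := by
        have e1 : data.getD e 0 - data.getD (e - 1) 0 = d := by
          have := hrun (e - 1) (by omega) (by omega)
          rwa [show e - 1 + 1 = e by omega] at this
        have e2 := runEnd3_max data d (s + 1) (by omega)
        simp only [pvCond, beq_eq_false_iff_ne, ne_eq]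
        rw [show e - 1 + 1 = e by omega, show e - 1 + 1 + 1 = e + 1 by omega, e1]
        intro hc
        exact e2 hc.symm
      have hcnt : data.length - 2 - s = (e - 1 - s) + (1 + (data.length - 2 - e)) := by omega
      rw [hcnt, range'_split, range'_split, show s + (e - 1 - s) = e - 1 by omega,
          show e - 1 + 1 = e by omega, List.range'_one,
          List.filter_append, List.filter_append]
      rw [List.filter_eq_self.mpr (by
        intro a ha
        have hm := List.mem_range'_1.mp ha
        exact hcondT a hm.1 (by omega))]
      simp [List.filter, hcondF]
    · have h0 : data.length - 2 - e = 0 := by omega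
      rw [h0]
      simp only [List.range'_zero, List.filter_nil, List.append_nil]
      rw [show e - 1 - s = data.length - 2 - s by omega]
      apply List.filter_eq_self.mpr
      intro a ha
      have hm := List.mem_range'_1.mp ha
      exact hcondT a hm.1 (by omega)
  | case2 res s h =>
    rw [show data.length - 2 - s = 0 by omega]
    simp

theorem FindLinerSeqs3_eq (data : List Int) :
    FindLinerSeqs3 data = FindLinerSeqs3_alt data := by
  rw [A_eq_filter, FindLinerSeqs3_alt, runsLoop_eq]
  simp

-- ===== VERDICT (by name: the statement is the Claim_ definition above) =====
theorem FindLinerSeqs3_spec : Claim_equal_FindLinerSeqs3 := by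
  intro data _
  unfold Spec_FindLinerSeqs3
  exact FindLinerSeqs3_eq data
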